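-- pv_equiv track=rewrite | github.com/sourcefabric-innovation/mediasearch | src/mediasearch/plugin/process.py | _out_get_base_path
-- ===== SOURCE A (Python) =====
-- def _out_get_base_path(entry=None, provider=None, archive=None, action=None):
--     use_parts = []
--     action_used = True
--     for one_part in [entry, provider, archive, action]:
--         if one_part is None:
--             action_used = False
--             break
--         use_parts.append(str(one_part))
--
--     base_path = '/'.join(use_parts)
--     if not action_used:
--         base_path = base_path + '/'
--
--     if not base_path.startswith('/'):
--         base_path = '/' + base_path
--
--     return base_path
-- ===== SOURCE B (Python) =====
-- def _out_get_base_path(entry=None, provider=None, archive=None, action=None):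
--     # Branch-chain formulation: the four truncation cases written out directly,
--     # no accumulator loop, no join, no action_used flag.
--     if entry is None:
--         base = '/'
--     elif provider is None:
--         base = str(entry) + '/'
--     elif archive is None:
--         base = str(entry) + '/' + str(provider) + '/'
--     elif action is None:
--         base = str(entry) + '/' + str(provider) + '/' + str(archive) + '/'
--     else:
--         base = str(entry) + '/' + str(provider) + '/' + str(archive) + '/' + str(action)
--     return base if base.startswith('/') else '/' + base
-- ===== Notes on version B (the rewrite author's own statement) =====
-- stated objective: simpler
-- what changed: Replaces A's accumulate-until-None loop with break, action_used flag and separator join by a direct branch chain that writes out the four truncation cases and formats each path directly.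
import Mathlib
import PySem

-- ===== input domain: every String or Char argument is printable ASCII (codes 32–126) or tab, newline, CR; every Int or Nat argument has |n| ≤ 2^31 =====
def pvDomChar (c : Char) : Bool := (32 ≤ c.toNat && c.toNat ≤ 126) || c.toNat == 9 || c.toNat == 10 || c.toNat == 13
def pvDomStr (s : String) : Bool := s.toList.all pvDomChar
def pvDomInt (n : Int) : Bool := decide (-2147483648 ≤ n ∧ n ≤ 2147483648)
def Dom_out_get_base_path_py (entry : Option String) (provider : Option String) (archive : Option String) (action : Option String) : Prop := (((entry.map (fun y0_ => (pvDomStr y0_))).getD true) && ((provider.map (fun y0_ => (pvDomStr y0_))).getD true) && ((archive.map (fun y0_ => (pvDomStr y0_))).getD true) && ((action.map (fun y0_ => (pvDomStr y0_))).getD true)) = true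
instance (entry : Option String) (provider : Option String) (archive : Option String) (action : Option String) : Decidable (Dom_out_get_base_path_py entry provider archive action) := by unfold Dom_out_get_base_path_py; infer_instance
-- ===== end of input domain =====

-- B replaces A's accumulate-and-break loop + join + action_used flag by a direct
-- branch chain over the four truncation cases (objective: simpler).

-- ===== PORT A =====
-- the for-loop with break: collects str(one_part) until the first None; Bool = action_used
def pvCollect : List (Option String) → List String × Bool
  | [] => ([], true)
  | none :: _ => ([], false)
  | some s :: rest =>
    let r := pvCollect rest
    (s :: r.1, r.2)

def out_get_base_path_py (entry : Option String) (provider : Option String) (archive : Option String) (action : Option String) : String :=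
  let r := pvCollect [entry, provider, archive, action]
  let basePath := PySem.Str.join "/" r.1
  let basePath := if r.2 then basePath else basePath ++ "/"
  if PySem.Str.startswith basePath "/" then basePath else "/" ++ basePath

-- ===== PORT B =====
def out_get_base_path_py_alt (entry : Option String) (provider : Option String) (archive : Option String) (action : Option String) : String :=
  let base : String :=
    match entry, provider, archive, action with
    | none, _, _, _ => "/"
    | some e, none, _, _ => e ++ "/"
    | some e, some p, none, _ => e ++ "/" ++ p ++ "/"
    | some e, some p, some ar, none => e ++ "/" ++ p ++ "/" ++ ar ++ "/"
    | some e, some p, some ar, some ac => e ++ "/" ++ p ++ "/" ++ ar ++ "/" ++ ac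
  if PySem.Str.startswith base "/" then base else "/" ++ base

-- ===== PRECONDITION & SPEC =====
def Spec_out_get_base_path_py (entry : Option String) (provider : Option String) (archive : Option String) (action : Option String) (out : String) : Prop := out = out_get_base_path_py_alt entry provider archive action
instance (entry : Option String) (provider : Option String) (archive : Option String) (action : Option String) (out : String) : Decidable (Spec_out_get_base_path_py entry provider archive action out) := by unfold Spec_out_get_base_path_py; infer_instance

-- ===== CLAIM (what is proved, stated in full; the proofs are below) =====
def Claim_equal_out_get_base_path_py : Prop := ∀ (entry : Option String) (provider : Option String) (archive : Option String) (action : Option String), Dom_out_get_base_path_py entry provider archive action → Spec_out_get_base_path_py entry provider archive action (out_get_base_path_py entry provider archive action)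

-- ===== LEMMAS AND PROOFS =====
theorem pvJoin0 : PySem.Str.join "/" ([] : List String) = "" := by
  apply String.ext; simp [PySem.Str.join, PySem.Chars.join, List.intercalate]

theorem pvJoin1 (a : String) : PySem.Str.join "/" [a] = a := by
  apply String.ext; simp [PySem.Str.join, PySem.Chars.join, List.intercalate]

theorem pvJoin2 (a b : String) : PySem.Str.join "/" [a, b] = a ++ "/" ++ b := by
  apply String.ext; simp [PySem.Str.join, PySem.Chars.join, List.intercalate]

theorem pvJoin3 (a b c : String) : PySem.Str.join "/" [a, b, c] = a ++ "/" ++ b ++ "/" ++ c := by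
  apply String.ext; simp [PySem.Str.join, PySem.Chars.join, List.intercalate]

theorem pvJoin4 (a b c d : String) : PySem.Str.join "/" [a, b, c, d] = a ++ "/" ++ b ++ "/" ++ c ++ "/" ++ d := by
  apply String.ext; simp [PySem.Str.join, PySem.Chars.join, List.intercalate]

-- ===== VERDICT (by name: the statement is the Claim_ definition above) =====
theorem out_get_base_path_py_spec : Claim_equal_out_get_base_path_py := by
  intro entry provider archive action _
  unfold Spec_out_get_base_path_py
  rcases entry with _ | e <;> rcases provider with _ | p <;>
    rcases archive with _ | ar <;> rcases action with _ | ac <;>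
    simp only [out_get_base_path_py, out_get_base_path_py_alt, pvCollect,
      pvJoin0, pvJoin1, pvJoin2, pvJoin3, pvJoin4, if_true] <;>
    rfl
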